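-- pv_equiv track=rewrite | github.com/eebmagic/car_trip_machine_learning | day_of_week_prediction.py | makeHourlyBinaries
-- ===== SOURCE A (Python) =====
-- def makeHourlyBinaries(inputList, index=0):
-- 	times = []
-- 	for row in inputList:
-- 		times.append(int(row[index] / 60))
--
-- 	output = []
-- 	for i in range(24):
-- 		output.append(i in times)
-- 	return output
-- ===== SOURCE B (Python) =====
-- def makeHourlyBinaries(inputList, index=0):
--     output = [False] * 24
--     for row in inputList:
--         hour = int(row[index] / 60)
--         if 0 <= hour < 24:
--             output[hour] = True
--     return output
-- ===== Notes on version B (the rewrite author's own statement) =====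
-- stated objective: simpler
-- what changed: Single scatter pass that buckets each row's hour directly into a fixed [False]*24 array (guarding 0<=hour<24), instead of building a times list and then scanning it 24 times with 'in'.
import Mathlib
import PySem

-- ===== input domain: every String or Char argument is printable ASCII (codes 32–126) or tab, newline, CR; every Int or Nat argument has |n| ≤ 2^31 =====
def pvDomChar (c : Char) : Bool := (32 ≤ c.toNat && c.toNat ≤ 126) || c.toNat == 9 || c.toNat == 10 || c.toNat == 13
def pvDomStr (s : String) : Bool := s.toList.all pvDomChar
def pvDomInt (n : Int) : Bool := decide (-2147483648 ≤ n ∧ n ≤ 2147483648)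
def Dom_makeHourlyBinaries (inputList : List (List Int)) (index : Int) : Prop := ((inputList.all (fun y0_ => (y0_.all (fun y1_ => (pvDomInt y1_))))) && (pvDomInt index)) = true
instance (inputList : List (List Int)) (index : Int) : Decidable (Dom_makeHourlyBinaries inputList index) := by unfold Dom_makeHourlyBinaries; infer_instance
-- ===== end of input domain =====

-- B replaces A's build-times-then-scan-24-times shape with one scatter pass into a fixed 24-slot array (objective: simpler).
-- Python's int(row[index] / 60) truncates toward zero; for |n| ≤ 2^31 the float division is exact at the
-- truncation boundary, so it is ported as Int.tdiv.

-- ===== PORT A =====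
def makeHourlyBinaries (inputList : List (List Int)) (index : Int) : List Bool :=
  let times := inputList.foldl
    (fun times row => times ++ [((PySem.List.pyGet? row index).getD 0).tdiv 60]) []
  (PySem.List.pyRange 0 24 1).foldl (fun output i => output ++ [times.contains i]) []

-- ===== PORT B =====
def makeHourlyBinaries_alt (inputList : List (List Int)) (index : Int) : List Bool :=
  inputList.foldl
    (fun output row =>
      let hour := ((PySem.List.pyGet? row index).getD 0).tdiv 60
      if 0 ≤ hour ∧ hour < 24 then output.set hour.toNat true else output)
    (List.replicate 24 false)

-- ===== PRECONDITION & SPEC =====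
-- A raises IndexError when row[index] is out of range for some row; exactly those inputs are excluded.
def Pre_makeHourlyBinaries (inputList : List (List Int)) (index : Int) : Prop :=
  ∀ row ∈ inputList, PySem.Raise.InRange row.length index
instance (inputList : List (List Int)) (index : Int) : Decidable (Pre_makeHourlyBinaries inputList index) := by unfold Pre_makeHourlyBinaries; infer_instance
def pvWitness_makeHourlyBinaries : List (List Int) × Int := ([[120, 5], [1500, 7], [59, 1]], 0)

def Spec_makeHourlyBinaries (inputList : List (List Int)) (index : Int) (out : List Bool) : Prop := out = makeHourlyBinaries_alt inputList index
instance (inputList : List (List Int)) (index : Int) (out : List Bool) : Decidable (Spec_makeHourlyBinaries inputList index out) := by unfold Spec_makeHourlyBinaries; infer_instance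

-- ===== CLAIM (what is proved, stated in full; the proofs are below) =====
def Claim_equal_makeHourlyBinaries : Prop := ∀ (inputList : List (List Int)) (index : Int), Dom_makeHourlyBinaries inputList index → Pre_makeHourlyBinaries inputList index → Spec_makeHourlyBinaries inputList index (makeHourlyBinaries inputList index)

-- ===== LEMMAS AND PROOFS =====

-- the per-row hour both programs compute
def pvHour (index : Int) (row : List Int) : Int := ((PySem.List.pyGet? row index).getD 0).tdiv 60

-- append-accumulator fold is a map
theorem foldl_append_map {α β : Type} (f : α → β) (xs : List α) (init : List β) :
    xs.foldl (fun acc x => acc ++ [f x]) init = init ++ xs.map f := by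
  induction xs generalizing init with
  | nil => simp
  | cons x xs ih => simp [List.foldl_cons, ih]

-- B's fold invariant: starting from any 24-long array
theorem alt_fold_invariant (index : Int) (rows : List (List Int)) (out : List Bool)
    (hlen : out.length = 24) :
    rows.foldl
      (fun output row =>
        let hour := ((PySem.List.pyGet? row index).getD 0).tdiv 60
        if 0 ≤ hour ∧ hour < 24 then output.set hour.toNat true else output)
      out
    = (List.range 24).map (fun k => out.getD k false || (rows.map (pvHour index)).contains (k : Int)) := by
  induction rows generalizing out with
  | nil =>
    apply List.ext_getElem
    · simp [hlen]
    · intro i h1 h2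
      simp at h2
      simp [List.getD_eq_getElem?_getD, hlen.symm ▸ h2]
  | cons r rs ih =>
    rw [List.foldl_cons]
    by_cases hc : 0 ≤ pvHour index r ∧ pvHour index r < 24
    · simp only [pvHour] at hc
      rw [if_pos hc, ih _ (by simp [hlen])]
      apply List.map_congr_left
      intro k hk
      simp only [List.mem_range] at hk
      have hkl : k < out.length := by omega
      simp only [pvHour, List.map_cons, List.contains_cons]
      by_cases hek : (((PySem.List.pyGet? r index).getD 0).tdiv 60).toNat = k
      · have hlt : (((PySem.List.pyGet? r index).getD 0).tdiv 60).toNat < out.length := by omega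
        have heq : ((k : Int) == ((PySem.List.pyGet? r index).getD 0).tdiv 60) = true := by
          simp only [beq_iff_eq]; omega
        rw [List.getD_eq_getElem?_getD, List.getElem?_set, if_pos hek, if_pos hlt]
        simp [heq]
      · have hb : ((k : Int) == ((PySem.List.pyGet? r index).getD 0).tdiv 60) = false := by
          simp only [beq_eq_false_iff_ne, ne_eq]; omega
        rw [List.getD_eq_getElem?_getD, List.getElem?_set, if_neg hek]
        simp [hb, List.getD_eq_getElem?_getD]
    · simp only [pvHour] at hc
      rw [if_neg hc, ih _ hlen]
      apply List.map_congr_left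
      intro k hk
      simp only [List.mem_range] at hk
      have hne : ((PySem.List.pyGet? r index).getD 0).tdiv 60 ≠ (k : Int) := by omega
      simp [List.map_cons, pvHour, Ne.symm hne]

-- ===== VERDICT (by name: the statement is the Claim_ definition above) =====
theorem makeHourlyBinaries_spec : Claim_equal_makeHourlyBinaries := by
  intro inputList index _ _
  unfold Spec_makeHourlyBinaries makeHourlyBinaries makeHourlyBinaries_alt
  rw [alt_fold_invariant index inputList (List.replicate 24 false) (by simp)]
  simp only [foldl_append_map, List.nil_append]
  have hz : ∀ k : Nat, (List.replicate 24 false).getD k false = false := by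
    intro k
    rcases Nat.lt_or_ge k 24 with h | h
    · rw [List.getD_eq_getElem _ _ (by simpa using h), List.getElem_replicate]
    · rw [List.getD_eq_default _ _ (by simpa using h)]
  simp only [hz, Bool.false_or]
  rw [PySem.List.pyRange_one]
  simp [List.map_map, pvHour, Function.comp]
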